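-- pv_equiv track=rewrite | github.com/AcBars/python_hm | task_3_3.py | con_nuber
-- ===== SOURCE A (Python) =====
-- def con_nuber(numeric_list_int):
--     numer_temp = []
--     count = 0
--     for i in range(0, (len(numeric_list_int) - 2)):
--         if numeric_list_int[i] == numeric_list_int[i + 1] == numeric_list_int[i + 2]:
--
--             for j in range(0, i):
--                 if numeric_list_int[i + 2] >= 5 and j == i - 1:
--                     numer_temp.append(numeric_list_int[j] + 1)
--                 else:
--                     numer_temp.append(numeric_list_int[j])
--             break
--     result = 0
--     for i in range(len(numer_temp)):
--         result = result + numer_temp[i] * 10 ** (len(numer_temp) - i -1)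
--     return result
-- ===== SOURCE B (Python) =====
-- def con_nuber(numeric_list_int):
--     xs = numeric_list_int
--     acc = 0
--     for i in range(len(xs) - 2):
--         if xs[i] == xs[i + 1] and xs[i + 1] == xs[i + 2]:
--             return acc + 1 if i > 0 and xs[i + 2] >= 5 else acc
--         acc = acc * 10 + xs[i]
--     return 0
-- ===== Notes on version B (the rewrite author's own statement) =====
-- stated objective: simpler
-- what changed: Single pass with one Horner accumulator (acc = acc*10 + d) that returns as soon as the triple is found, replacing A's build of an intermediate numer_temp list followed by a second positional loop computing 10**(len-i-1) powers.
import Mathlib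
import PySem

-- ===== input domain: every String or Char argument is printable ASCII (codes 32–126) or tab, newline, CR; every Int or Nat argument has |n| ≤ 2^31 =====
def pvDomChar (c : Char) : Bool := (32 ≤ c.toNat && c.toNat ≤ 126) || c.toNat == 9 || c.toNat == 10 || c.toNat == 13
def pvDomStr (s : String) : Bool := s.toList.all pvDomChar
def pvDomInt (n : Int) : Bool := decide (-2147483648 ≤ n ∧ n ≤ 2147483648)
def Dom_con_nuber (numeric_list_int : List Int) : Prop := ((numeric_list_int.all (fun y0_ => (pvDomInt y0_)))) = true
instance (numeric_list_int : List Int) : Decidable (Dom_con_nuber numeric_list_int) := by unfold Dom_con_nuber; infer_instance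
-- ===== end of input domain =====

-- B replaces A's intermediate list + positional 10**(k) second loop by a single Horner pass; objective: simpler.

-- ===== PORT A =====
-- A's first loop: for i in range(0, len-2), break at the first consecutive triple,
-- building numer_temp from the prefix (last element +1 when the triple value >= 5).
-- Fuel n = (len - 2) - i; every index A reads is in range in Python, so getD is exact.
def con_nuber_find (xs : List Int) : Nat → Nat → List Int
  | 0, _ => []
  | n + 1, i =>
    if xs.getD i 0 = xs.getD (i + 1) 0 ∧ xs.getD (i + 1) 0 = xs.getD (i + 2) 0 then
      (List.range i).map (fun j =>
        if xs.getD (i + 2) 0 ≥ 5 ∧ j = i - 1 then xs.getD j 0 + 1 else xs.getD j 0)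
    else con_nuber_find xs n (i + 1)

def con_nuber (numeric_list_int : List Int) : Int :=
  let temp := con_nuber_find numeric_list_int (numeric_list_int.length - 2) 0
  (List.range temp.length).foldl
    (fun r i => r + temp.getD i 0 * 10 ^ (temp.length - i - 1)) 0

-- ===== PORT B =====
-- B's single loop: sliding three-element window, Horner accumulator acc, current index i.
def con_nuber_alt_go : List Int → Nat → Int → Int
  | a :: b :: c :: rest, i, acc =>
    if a = b ∧ b = c then (if 0 < i ∧ c ≥ 5 then acc + 1 else acc)
    else con_nuber_alt_go (b :: c :: rest) (i + 1) (acc * 10 + a)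
  | _, _, _ => 0

def con_nuber_alt (numeric_list_int : List Int) : Int :=
  con_nuber_alt_go numeric_list_int 0 0

-- ===== PRECONDITION & SPEC =====
def Spec_con_nuber (numeric_list_int : List Int) (out : Int) : Prop := out = con_nuber_alt numeric_list_int
instance (numeric_list_int : List Int) (out : Int) : Decidable (Spec_con_nuber numeric_list_int out) := by unfold Spec_con_nuber; infer_instance

-- ===== CLAIM (what is proved, stated in full; the proofs are below) =====
def Claim_equal_con_nuber : Prop := ∀ (numeric_list_int : List Int), Dom_con_nuber numeric_list_int → Spec_con_nuber numeric_list_int (con_nuber numeric_list_int)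

-- ===== LEMMAS AND PROOFS =====

-- getD through an append.
theorem pvGetD_append_left (l1 l2 : List Int) (i : Nat) (h : i < l1.length) :
    (l1 ++ l2).getD i 0 = l1.getD i 0 := by
  simp [List.getD_eq_getElem?_getD, List.getElem?_append_left h]

theorem pvGetD_append_right (l1 l2 : List Int) (i : Nat) (h : l1.length ≤ i) :
    (l1 ++ l2).getD i 0 = l2.getD (i - l1.length) 0 := by
  simp [List.getD_eq_getElem?_getD, List.getElem?_append_right h]

-- Horner fold (B's accumulator) and the positional polynomial (A's second loop).
def pvH (l : List Int) (a : Int) : Int := l.foldl (fun r d => r * 10 + d) a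

def pvPoly : List Int → Int
  | [] => 0
  | d :: t => d * 10 ^ t.length + pvPoly t

theorem pvH_eq (l : List Int) (a : Int) : pvH l a = a * 10 ^ l.length + pvPoly l := by
  induction l generalizing a with
  | nil => simp [pvH, pvPoly]
  | cons d t ih =>
    simp only [pvH, List.foldl_cons, pvPoly, List.length_cons] at *
    rw [ih]
    ring

theorem pvH_concat (q : List Int) (d : Int) (a : Int) :
    pvH (q ++ [d]) a = pvH q a * 10 + d := by
  simp [pvH]

theorem pvPoly_concat (q : List Int) (e : Int) :
    pvPoly (q ++ [e]) = 10 * pvPoly q + e := by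
  induction q with
  | nil => simp [pvPoly]
  | cons d t ih => simp [pvPoly, ih]; ring

-- A's second loop equals the positional polynomial.
theorem pvRangeFoldl (l : List Int) (s : Int) :
    (List.range l.length).foldl (fun r i => r + l.getD i 0 * 10 ^ (l.length - i - 1)) s
      = s + pvPoly l := by
  induction l generalizing s with
  | nil => simp [pvPoly]
  | cons d t ih =>
    rw [List.length_cons, List.range_succ_eq_map, List.foldl_cons, List.foldl_map]
    have hfun : (fun (r : Int) (i : Nat) => r + (d :: t).getD (i + 1) 0 * 10 ^ (t.length + 1 - (i + 1) - 1))
        = (fun (r : Int) (i : Nat) => r + t.getD i 0 * 10 ^ (t.length - i - 1)) := by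
      funext r i
      have h : t.length + 1 - (i + 1) - 1 = t.length - i - 1 := by omega
      rw [h]
      simp
    have hstep : s + (d :: t).getD 0 0 * 10 ^ (t.length + 1 - 0 - 1) = s + d * 10 ^ t.length := by
      simp
    rw [hfun, hstep, ih]
    simp [pvPoly]
    ring

theorem pvMap_range_getD (l : List Int) :
    (List.range l.length).map (fun j => l.getD j 0) = l := by
  apply List.ext_getElem
  · simp
  · intro i h1 h2
    simp at h1
    simp [List.getD_eq_getElem?_getD, List.getElem?_eq_getElem h1]

theorem pvMap_range_bump (q : List Int) (d : Int) :
    (List.range (q.length + 1)).map (fun j =>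
        if j = q.length then (q ++ [d]).getD j 0 + 1 else (q ++ [d]).getD j 0)
      = q ++ [d + 1] := by
  apply List.ext_getElem
  · simp
  · intro i h1 h2
    simp only [List.length_map, List.length_range] at h1
    simp only [List.getElem_map, List.getElem_range]
    by_cases hi : i = q.length
    · subst hi
      rw [if_pos rfl, pvGetD_append_right q [d] q.length (le_refl _)]
      simp
    · have hlt : i < q.length := by omega
      rw [if_neg hi, pvGetD_append_left q [d] i hlt]
      rw [List.getElem_append_left hlt]
      simp [List.getD_eq_getElem?_getD, List.getElem?_eq_getElem hlt]

-- Main invariant: A scanning xs = pre ++ suf from index pre.length with fuel suf.length - 2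
-- matches B's loop on suf with accumulator = Horner value of pre.
theorem pvMain : ∀ (suf pre : List Int),
    pvPoly (con_nuber_find (pre ++ suf) (suf.length - 2) pre.length)
      = con_nuber_alt_go suf pre.length (pvH pre 0)
  | [], _ => by simp [con_nuber_find, con_nuber_alt_go, pvPoly]
  | [_], _ => by simp [con_nuber_find, con_nuber_alt_go, pvPoly]
  | [_, _], _ => by simp [con_nuber_find, con_nuber_alt_go, pvPoly]
  | a :: b :: c :: rest, pre => by
    have hga : (pre ++ a :: b :: c :: rest).getD pre.length 0 = a := by
      rw [pvGetD_append_right _ _ _ (le_refl _)]; simp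
    have hgb : (pre ++ a :: b :: c :: rest).getD (pre.length + 1) 0 = b := by
      rw [pvGetD_append_right _ _ _ (by omega)]
      have h1 : pre.length + 1 - pre.length = 1 := by omega
      rw [h1]
      simp [List.getD]
    have hgc : (pre ++ a :: b :: c :: rest).getD (pre.length + 2) 0 = c := by
      rw [pvGetD_append_right _ _ _ (by omega)]
      have h2 : pre.length + 2 - pre.length = 2 := by omega
      rw [h2]
      simp [List.getD]
    have hlen : (a :: b :: c :: rest).length - 2 = rest.length + 1 := by simp
    rw [hlen]
    show pvPoly (con_nuber_find (pre ++ a :: b :: c :: rest) (rest.length + 1) pre.length) = _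
    rw [con_nuber_find, hga, hgb, hgc]
    by_cases htr : a = b ∧ b = c
    · rw [if_pos htr]
      have hmap1 : (List.range pre.length).map (fun j =>
            if (pre ++ a :: b :: c :: rest).getD (pre.length + 2) 0 ≥ 5 ∧ j = pre.length - 1
            then (pre ++ a :: b :: c :: rest).getD j 0 + 1
            else (pre ++ a :: b :: c :: rest).getD j 0)
          = (List.range pre.length).map (fun j =>
            if c ≥ 5 ∧ j = pre.length - 1 then pre.getD j 0 + 1 else pre.getD j 0) := by
        apply List.map_congr_left
        intro j hj
        rw [List.mem_range] at hj
        rw [hgc, pvGetD_append_left _ _ _ hj]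
      rw [hgc] at hmap1
      rw [hmap1]
      rw [con_nuber_alt_go, if_pos htr]
      by_cases hc : c ≥ 5
      · rcases pre.eq_nil_or_concat with rfl | ⟨q, d, rfl⟩
        · simp [pvPoly, pvH]
        · simp only [List.concat_eq_append] at hmap1 ⊢
          have hif : (fun j => if c ≥ 5 ∧ j = (q ++ [d]).length - 1 then (q ++ [d]).getD j 0 + 1
                else (q ++ [d]).getD j 0)
              = (fun j => if j = q.length then (q ++ [d]).getD j 0 + 1 else (q ++ [d]).getD j 0) := by
            funext j
            simp [hc]
          have hlq : (q ++ [d]).length = q.length + 1 := by simp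
          rw [hif, hlq, pvMap_range_bump, pvPoly_concat]
          have hpos : 0 < q.length + 1 ∧ c ≥ 5 := ⟨Nat.succ_pos _, hc⟩
          rw [if_pos hpos, pvH_concat, pvH_eq]
          simp
          ring
      · have hif : (fun j => if c ≥ 5 ∧ j = pre.length - 1 then pre.getD j 0 + 1 else pre.getD j 0)
            = (fun j => pre.getD j 0) := by
          funext j
          simp [hc]
        rw [hif, pvMap_range_getD]
        have : ¬ (0 < pre.length ∧ c ≥ 5) := by tauto
        rw [if_neg this, pvH_eq]
        simp
    · rw [if_neg htr]
      rw [con_nuber_alt_go, if_neg htr]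
      have happ : pre ++ a :: b :: c :: rest = (pre ++ [a]) ++ b :: c :: rest := by simp
      have hl2 : (b :: c :: rest).length - 2 = rest.length := by simp
      have := pvMain (b :: c :: rest) (pre ++ [a])
      rw [hl2, pvH_concat] at this
      rw [happ]
      have hlen1 : (pre ++ [a]).length = pre.length + 1 := by simp
      rw [hlen1] at this
      exact this

-- ===== VERDICT (by name: the statement is the Claim_ definition above) =====
theorem con_nuber_spec : Claim_equal_con_nuber := by
  intro xs _
  show con_nuber xs = con_nuber_alt xs
  have h := pvMain xs []
  simp only [List.nil_append, List.length_nil] at h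
  unfold con_nuber con_nuber_alt
  rw [pvRangeFoldl]
  simpa [pvH] using h
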